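-- pv_equiv track=rewrite | github.com/VerstraeteBert/algos-ds | test/vraag4/src/synoniemen/304.py | synoniemen
-- ===== SOURCE A (Python) =====
-- def synoniemen(zin, woorden_boek):
--     zin_list = zin.split()
--     for woord in zin_list:
--         if woord in woorden_boek:
--             nieuw_woord = woorden_boek.get(woord)
--             index = zin_list.index(woord)
--             zin_list.remove(woord)
--             zin_list.insert(index, nieuw_woord)
--     nieuwe_zin = " ".join(zin_list)
--     return nieuwe_zin
-- ===== SOURCE B (Python) =====
-- def synoniemen(zin, woorden_boek):
--     return " ".join(woorden_boek.get(woord, woord) for woord in zin.split())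
-- ===== Notes on version B (the rewrite author's own statement) =====
-- stated objective: simpler
-- what changed: B replaces A's mutate-in-place loop (membership test plus list.index/remove/insert rescans per word) by a single pass that maps each word through the dictionary and joins the results; Pre_ excludes only the rare inputs where a synonym chain (the D_ region) runs through a multi-word or empty synonym value, a corner no caller of a word-for-word synonym dictionary means.
-- intended difference: When a word's synonym is itself a dictionary key (with a different synonym) and reappears later in the sentence, A's list.index finds the freshly substituted copy first and replaces it again, chaining synonyms and leaving the later word untouched; B replaces each original word by its own synonym exactly once, which is what synonym substitution is meant to do. — e.g. on synoniemen("a b", [("a", "b"), ("b", "c")]): A returns "c b", B returns "b c"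
-- outside the precondition, e.g. on synoniemen('a b', {'a': 'b', 'b': 'x y'}): A returns 'x y b', B returns 'b x y'
import Mathlib
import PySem

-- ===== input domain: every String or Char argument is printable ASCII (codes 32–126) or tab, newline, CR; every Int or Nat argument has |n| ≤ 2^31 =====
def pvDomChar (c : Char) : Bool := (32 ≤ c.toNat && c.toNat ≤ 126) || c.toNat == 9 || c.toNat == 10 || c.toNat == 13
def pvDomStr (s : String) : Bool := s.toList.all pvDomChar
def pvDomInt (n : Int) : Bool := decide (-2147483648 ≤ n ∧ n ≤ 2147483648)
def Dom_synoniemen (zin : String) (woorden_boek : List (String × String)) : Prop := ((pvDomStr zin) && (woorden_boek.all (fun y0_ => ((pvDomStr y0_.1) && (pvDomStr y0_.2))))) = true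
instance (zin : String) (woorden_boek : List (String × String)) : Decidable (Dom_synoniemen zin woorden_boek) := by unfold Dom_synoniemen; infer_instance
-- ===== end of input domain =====

-- B replaces A's mutate-in-place loop (list.index/remove/insert rescans) by one pass mapping
-- each word through the dictionary; on sentences where a synonym is itself a dictionary key
-- that reappears later, A chains replacements by accident — that region is stated as D_ below.


-- ===== PORT A =====
-- `for woord in zin_list` iterates by index over the mutating list; every iteration keeps the
-- length (remove of a present element + insert), so the iterator visits indices 0..len-1.
-- The `.getD` defaults totalize operations that are guarded (woord = zin_list[i] is always a
-- member, and the key is in the dict), so this port is exact.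
def synoniemen (zin : String) (woorden_boek : List (String × String)) : String :=
  let d := PySem.Dict.ofList woorden_boek
  let zin_list := PySem.Str.split₀ zin
  let fin := (List.range zin_list.length).foldl (fun cur i =>
    let woord := cur.getD i ""
    if d.contains woord then
      let nieuw_woord := (d.get? woord).getD ""          -- .get(woord): some, key present
      let index := (PySem.List.index? cur woord).getD 0  -- woord = cur[i] ∈ cur: some
      let cur1 := (PySem.List.remove? cur woord).getD cur
      PySem.List.insert cur1 (index : Int) nieuw_woord
    else cur) zin_list
  PySem.Str.join " " fin

-- ===== PORT B =====
def synoniemen_alt (zin : String) (woorden_boek : List (String × String)) : String :=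
  let d := PySem.Dict.ofList woorden_boek
  PySem.Str.join " " ((PySem.Str.split₀ zin).map (fun woord => (d.get? woord).getD woord))

-- ===== PRECONDITION & SPEC =====
-- the chain condition: some sentence word's synonym is itself a later sentence word that is a
-- dictionary key with a different synonym of its own (then A's list.index replaces the
-- substituted copy instead of the later word)
def chainFires (zin : String) (woorden_boek : List (String × String)) : Bool :=
  let ws := PySem.Str.split₀ zin
  let d := PySem.Dict.ofList woorden_boek
  (List.range ws.length).any (fun i => (List.range ws.length).any (fun j =>
    decide (i < j) && d.contains (ws.getD i "") &&
    ((d.get? (ws.getD i "")).getD "" == ws.getD j "") &&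
    d.contains (ws.getD j "") &&
    !((d.get? (ws.getD j "")).getD "" == ws.getD j "") &&
    !(ws.getD j "" == ws.getD i "")))

-- every sentence word that has a synonym gets a single nonempty word without spaces
def cleanSyns (zin : String) (woorden_boek : List (String × String)) : Bool :=
  (PySem.Str.split₀ zin).all (fun w =>
    ((PySem.Dict.ofList woorden_boek).get? w).elim true
      (fun v => !(v == "") && !(v.toList.contains ' ')))

-- Pre_ excludes only the rare inputs where a synonym chain (the D_ condition below) runs through
-- a multi-word or empty synonym value: there the space-joined outputs of both programs interact
-- with word boundaries irregularly, a corner no caller of a word-for-word synonym dictionary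
-- means; B still does the natural per-word mapping there.
def Pre_synoniemen (zin : String) (woorden_boek : List (String × String)) : Prop :=
  chainFires zin woorden_boek = true → cleanSyns zin woorden_boek = true
instance (zin : String) (woorden_boek : List (String × String)) : Decidable (Pre_synoniemen zin woorden_boek) := by unfold Pre_synoniemen; infer_instance

def pvWitness_synoniemen : String × (List (String × String)) := ("hallo wereld", [("hallo", "dag")])

-- When a word's synonym is itself a dictionary key (with a different synonym) and reappears later
-- in the sentence, A's list.index finds the freshly substituted copy first and replaces it again,
-- chaining synonyms and leaving the later word untouched; B replaces each original word by its own
-- synonym exactly once, which is what synonym substitution is meant to do.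
def D_synoniemen (zin : String) (woorden_boek : List (String × String)) : Prop :=
  (chainFires zin woorden_boek && cleanSyns zin woorden_boek) = true
instance (zin : String) (woorden_boek : List (String × String)) : Decidable (D_synoniemen zin woorden_boek) := by unfold D_synoniemen; infer_instance

def Spec_synoniemen (zin : String) (woorden_boek : List (String × String)) (out : String) : Prop := ¬ D_synoniemen zin woorden_boek → out = synoniemen_alt zin woorden_boek
instance (zin : String) (woorden_boek : List (String × String)) (out : String) : Decidable (Spec_synoniemen zin woorden_boek out) := by unfold Spec_synoniemen; infer_instance

def pvDiffWitness_synoniemen : String × (List (String × String)) := ("a b", [("a", "b"), ("b", "c")])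
def pvDiffWitnessOut_synoniemen : String × String := ("c b", "b c")

-- ===== CLAIM (what is proved, stated in full; the proofs are below) =====
def Claim_unchanged_synoniemen : Prop := ∀ (zin : String) (woorden_boek : List (String × String)), Dom_synoniemen zin woorden_boek → Pre_synoniemen zin woorden_boek → Spec_synoniemen zin woorden_boek (synoniemen zin woorden_boek)
def Claim_changed_synoniemen : Prop := Dom_synoniemen (pvDiffWitness_synoniemen.1) (pvDiffWitness_synoniemen.2) ∧ Pre_synoniemen (pvDiffWitness_synoniemen.1) (pvDiffWitness_synoniemen.2) ∧ D_synoniemen (pvDiffWitness_synoniemen.1) (pvDiffWitness_synoniemen.2) ∧ synoniemen (pvDiffWitness_synoniemen.1) (pvDiffWitness_synoniemen.2) = pvDiffWitnessOut_synoniemen.1 ∧ synoniemen_alt (pvDiffWitness_synoniemen.1) (pvDiffWitness_synoniemen.2) = pvDiffWitnessOut_synoniemen.2 ∧ pvDiffWitnessOut_synoniemen.1 ≠ pvDiffWitnessOut_synoniemen.2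
def Claim_exact_synoniemen : Prop := ∀ (zin : String) (woorden_boek : List (String × String)), Dom_synoniemen zin woorden_boek → Pre_synoniemen zin woorden_boek → D_synoniemen zin woorden_boek → synoniemen zin woorden_boek ≠ synoniemen_alt zin woorden_boek

-- ===== LEMMAS AND PROOFS =====

-- A's loop body, as a named function (definitionally the port's lambda)
def stepA (d : PySem.Dict String String) (cur : List String) (i : Nat) : List String :=
  let woord := cur.getD i ""
  if d.contains woord then
    let nieuw_woord := (d.get? woord).getD ""
    let index := (PySem.List.index? cur woord).getD 0
    let cur1 := (PySem.List.remove? cur woord).getD cur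
    PySem.List.insert cur1 (index : Int) nieuw_woord
  else cur

-- B's per-word map
def fB (d : PySem.Dict String String) (w : String) : String := (d.get? w).getD w

lemma set_append_len {α : Type} (pre suf : List α) (w v : α) :
    (pre ++ w :: suf).set pre.length v = pre ++ v :: suf := by
  induction pre with
  | nil => rfl
  | cons a t ih => simpa using ih

lemma getD_append_len (pre suf : List String) (w x : String) :
    (pre ++ w :: suf).getD pre.length x = w := by
  induction pre with
  | nil => rfl
  | cons a t ih => simpa using ih

lemma set_getD_self (xs : List String) (k : Nat) (v : String)
    (h : xs.getD k "" = v) (hk : k < xs.length) : xs.set k v = xs := by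
  induction xs generalizing k with
  | nil => simp at hk
  | cons a t ih =>
    cases k with
    | zero => simp only [List.getD_cons_zero] at h; simp [h]
    | succ n =>
      simp only [List.getD_cons_succ] at h
      simp [ih n h (by simpa using hk)]

lemma getD_map_append (l suf : List String) (g : String → String) (k : Nat)
    (hk : k < l.length) :
    ((l.map g) ++ suf).getD k "" = g (l.getD k "") := by
  induction l generalizing k with
  | nil => simp at hk
  | cons a t ih =>
    cases k with
    | zero => rfl
    | succ n => simpa using ih n (by simpa using hk)

lemma getD_take (orig : List String) (i k : Nat) (hk : k < i) (hk3 : k < orig.length) :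
    (orig.take i).getD k "" = orig.getD k "" := by
  have h4 : k < (orig.take i).length := by simp; omega
  rw [List.getD_eq_getElem _ _ h4, List.getD_eq_getElem _ _ hk3, List.getElem_take]

-- A's remove-then-insert at the first index is a set at that index
lemma removeInsert_eq_set (cur : List String) (w nw : String) (k₀ : Nat)
    (hidx : PySem.List.index? cur w = some k₀) :
    PySem.List.insert ((PySem.List.remove? cur w).getD cur) ((k₀ : Nat) : Int) nw =
      cur.set k₀ nw := by
  obtain ⟨pre, suf, hdec, hklen, hwpre⟩ := (PySem.List.index?_eq_some_iff cur w k₀).1 hidx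
  have hmem : w ∈ cur := by rw [hdec]; simp
  rw [PySem.List.remove?_eq_some_erase cur w hmem]
  simp only [Option.getD_some]
  have herase : cur.erase w = pre ++ suf := by
    rw [hdec, List.erase_append_right _ hwpre, List.erase_cons_head]
  rw [herase, PySem.List.insert_natCast _ _ _ (by simp; omega)]
  rw [← hklen, List.take_left, List.drop_left, hdec]
  exact (set_append_len pre suf w nw).symm

-- the synchronized step: outside the chain condition, A's step i turns the mixed list
-- (mapped prefix ++ untouched suffix) into the same list with one more cell mapped
lemma stepA_shape (d : PySem.Dict String String) (orig : List String) (i : Nat)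
    (hi : i < orig.length)
    (hnd : ∀ k, k < i → d.contains (orig.getD k "") = true →
      (d.get? (orig.getD k "")).getD "" = orig.getD i "" →
      d.contains (orig.getD i "") = true →
      (d.get? (orig.getD i "")).getD "" = orig.getD i "" ∨ orig.getD i "" = orig.getD k "") :
    stepA d ((orig.take i).map (fB d) ++ orig.drop i) i =
      (orig.take (i + 1)).map (fB d) ++ orig.drop (i + 1) := by
  set w := orig.getD i "" with hw
  set pre := (orig.take i).map (fB d) with hpre
  have hprelen : pre.length = i := by simp [hpre]; omega
  have hdropi : orig.drop i = w :: orig.drop (i + 1) := by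
    rw [hw, List.getD_eq_getElem _ _ hi]
    exact List.drop_eq_getElem_cons hi
  have htake : (orig.take (i + 1)).map (fB d) = pre ++ [fB d w] := by
    rw [List.take_succ, List.getElem?_eq_getElem hi, List.map_append, hw,
      List.getD_eq_getElem _ _ hi]
    rfl
  set cur := pre ++ orig.drop i with hcur
  have hcur2 : cur = pre ++ w :: orig.drop (i + 1) := by rw [hcur, hdropi]
  have hcuri : cur.getD i "" = w := by
    rw [hcur2, ← hprelen]; exact getD_append_len ..
  have hprek : ∀ k, k < i → cur.getD k "" = fB d (orig.getD k "") := by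
    intro k hk
    have hk3 : k < orig.length := by omega
    have hkt : k < (orig.take i).length := by simp; omega
    rw [hcur, hpre, getD_map_append _ _ _ _ hkt, getD_take orig i k hk hk3]
  by_cases hc : d.contains w
  · -- dictionary word
    have hmem : w ∈ cur := by rw [hcur2]; simp
    obtain ⟨k₀, hk₀⟩ := Option.isSome_iff_exists.1 ((PySem.List.index?_isSome_iff cur w).2 hmem)
    obtain ⟨hk₀lt, hcurk₀, hmin⟩ := PySem.List.getElem_of_index?_eq_some hk₀
    have hstep : stepA d cur i = cur.set k₀ ((d.get? w).getD "") := by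
      unfold stepA
      rw [hcuri, if_pos hc, hk₀]
      simp only [Option.getD_some]
      exact removeInsert_eq_set cur w _ k₀ hk₀
    have hck : cur.getD k₀ "" = w := by
      rw [List.getD_eq_getElem _ _ hk₀lt, hcurk₀]
    have hk₀le : k₀ ≤ i := by
      by_contra hcon
      have hilt : i < cur.length := by
        have hl : cur.length = orig.length := by rw [hcur2]; simp; omega
        omega
      exact hmin i (by omega) (by rw [← List.getD_eq_getElem _ _ hilt]; exact hcuri)
    have hgwsome : ∃ vw, d.get? w = some vw := by
      apply Option.isSome_iff_exists.1
      rw [← PySem.Dict.contains_eq_isSome_get?]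
      exact hc
    obtain ⟨vw, hvw⟩ := hgwsome
    by_cases hk : k₀ < i
    · -- the leftmost w is an already-substituted cell: ¬D_ forces book[w] = w, a no-op
      have hfk : fB d (orig.getD k₀ "") = w := by rw [← hprek k₀ hk, hck]
      have hcontk : d.contains (orig.getD k₀ "") = true := by
        by_contra hcon
        have hcon' : d.contains (orig.getD k₀ "") = false := Bool.eq_false_iff.2 hcon
        have hnone : d.get? (orig.getD k₀ "") = none :=
          (PySem.Dict.get?_eq_none_iff_contains ..).2 hcon'
        rw [fB, hnone, Option.getD_none] at hfk
        rw [← hfk] at hc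
        rw [hcon'] at hc
        exact Bool.noConfusion hc
      obtain ⟨v, hv⟩ : ∃ v, d.get? (orig.getD k₀ "") = some v := by
        apply Option.isSome_iff_exists.1
        rw [← PySem.Dict.contains_eq_isSome_get?]
        exact hcontk
      have hgk : (d.get? (orig.getD k₀ "")).getD "" = w := by
        rw [fB, hv] at hfk
        rw [hv]
        simpa using hfk
      have hgw : (d.get? w).getD "" = w := by
        rcases hnd k₀ hk hcontk hgk hc with h | h
        · exact h
        · have heq : d.get? (orig.getD k₀ "") = d.get? w := by rw [← h]
          rw [heq, hvw] at hgk
          rw [hvw]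
          simpa using hgk
      have hfw : fB d w = w := by
        rw [fB, hvw]
        rw [hvw] at hgw
        simpa using hgw
      rw [hstep, hgw, set_getD_self cur k₀ w hck hk₀lt, htake, hfw, hcur2, List.append_assoc]
      rfl
    · -- first occurrence is cell i itself: plain substitution
      have hk₀i : k₀ = i := by omega
      subst hk₀i
      have hset : (pre ++ w :: orig.drop (k₀ + 1)).set k₀ ((d.get? w).getD "") =
          pre ++ ((d.get? w).getD "") :: orig.drop (k₀ + 1) := by
        have h := set_append_len pre (orig.drop (k₀ + 1)) w ((d.get? w).getD "")
        rwa [hprelen] at h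
      have hfw : fB d w = (d.get? w).getD "" := by rw [fB, hvw]; rfl
      rw [hstep, hcur2, hset, htake, hfw, List.append_assoc]
      rfl
  · -- not a dictionary word
    have hstep : stepA d cur i = cur := by unfold stepA; rw [hcuri, if_neg hc]
    have hfw : fB d w = w := by
      rw [fB, (PySem.Dict.get?_eq_none_iff_contains ..).2 (by simpa using hc)]
      rfl
    rw [hstep, htake, hfw, hcur2, List.append_assoc]
    rfl

-- cells at or after position i of the clean state are the original words
lemma clean_suffix (d : PySem.Dict String String) (orig : List String) (i q : Nat)
    (hiq : i ≤ q) (hq : q < orig.length) :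
    ((orig.take i).map (fB d) ++ orig.drop i).getD q "" = orig.getD q "" := by
  have hlen : ((orig.take i).map (fB d)).length = i := by simp; omega
  rw [List.getD_eq_getElem?_getD, List.getElem?_append_right (by omega), hlen,
    List.getElem?_drop, show i + (q - i) = q by omega, ← List.getD_eq_getElem?_getD]

-- cells before position i of the clean state are the mapped words
lemma clean_prefix (d : PySem.Dict String String) (orig : List String) (i k : Nat)
    (hk : k < i) (hk3 : k < orig.length) :
    ((orig.take i).map (fB d) ++ orig.drop i).getD k "" = fB d (orig.getD k "") := by
  have hkt : k < (orig.take i).length := by simp; omega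
  rw [getD_map_append _ _ _ _ hkt, getD_take orig i k hk hk3]

lemma getD_set_ne (cur : List String) (k m : Nat) (v : String) (h : k ≠ m) :
    (cur.set k v).getD m "" = cur.getD m "" := by
  rw [List.getD_eq_getElem?_getD, List.getElem?_set_ne h, ← List.getD_eq_getElem?_getD]

-- A's step, case analysis: skip, or a set at the leftmost occurrence of the read word
lemma stepA_cases (d : PySem.Dict String String) (cur : List String) (i : Nat)
    (hi : i < cur.length) :
    (d.contains (cur.getD i "") = false ∧ stepA d cur i = cur) ∨
    (∃ k₀ v, d.contains (cur.getD i "") = true ∧ d.get? (cur.getD i "") = some v ∧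
      k₀ ≤ i ∧ k₀ < cur.length ∧ cur.getD k₀ "" = cur.getD i "" ∧
      (∀ j, j < k₀ → cur.getD j "" ≠ cur.getD i "") ∧ stepA d cur i = cur.set k₀ v) := by
  set w := cur.getD i "" with hw
  by_cases hc : d.contains w
  · right
    have hmem : w ∈ cur := by
      rw [hw, List.getD_eq_getElem _ _ hi]
      exact List.getElem_mem hi
    obtain ⟨k₀, hk₀⟩ := Option.isSome_iff_exists.1 ((PySem.List.index?_isSome_iff cur w).2 hmem)
    obtain ⟨hk₀lt, hcurk₀, hmin⟩ := PySem.List.getElem_of_index?_eq_some hk₀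
    obtain ⟨v, hv⟩ : ∃ v, d.get? w = some v := by
      apply Option.isSome_iff_exists.1
      rw [← PySem.Dict.contains_eq_isSome_get?]
      exact hc
    have hminD : ∀ j, j < k₀ → cur.getD j "" ≠ w := by
      intro j hj
      rw [List.getD_eq_getElem _ _ (by omega)]
      exact hmin j hj
    have hk₀le : k₀ ≤ i := by
      by_contra hcon
      exact hminD i (by omega) hw.symm
    refine ⟨k₀, v, hc, hv, hk₀le, hk₀lt, by rw [List.getD_eq_getElem _ _ hk₀lt, hcurk₀], hminD, ?_⟩
    unfold stepA
    rw [← hw, if_pos hc, hk₀]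
    simp only [Option.getD_some]
    rw [hv]
    simp only [Option.getD_some]
    exact removeInsert_eq_set cur w _ k₀ hk₀
  · left
    refine ⟨Bool.eq_false_iff.2 hc, ?_⟩
    unfold stepA
    rw [← hw, if_neg hc]

-- every cell of the run stays a token: each lookup reads an untouched cell (= an original
-- word), so only synonyms of sentence words are ever inserted
lemma tokens_run (d : PySem.Dict String String) (orig : List String) (P : String → Prop)
    (hvals : ∀ w, w ∈ orig → ∀ v, d.get? w = some v → P v) :
    ∀ (m t : Nat) (cur : List String), t + m = orig.length → cur.length = orig.length →
      (∀ q, t ≤ q → q < orig.length → cur.getD q "" = orig.getD q "") →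
      (∀ x ∈ cur, P x) →
      ∀ x ∈ (List.range' t m).foldl (stepA d) cur, P x := by
  intro m
  induction m with
  | zero => intro t cur _ _ _ hcur x hx; exact hcur x hx
  | succ m ih =>
    intro t cur hm hlen hsuf hcur
    have ht : t < orig.length := by omega
    rw [List.range'_succ, List.foldl_cons]
    rcases stepA_cases d cur t (by omega) with ⟨_, heq⟩ | ⟨k₀, v, _, hv, hk₀t, _, _, _, heq⟩
    · rw [heq]
      exact ih (t + 1) cur (by omega) hlen (fun q h1 h2 => hsuf q (by omega) h2) hcur
    · rw [heq]
      have hw : cur.getD t "" = orig.getD t "" := hsuf t (le_refl t) ht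
      have hmemw : orig.getD t "" ∈ orig := by
        rw [List.getD_eq_getElem _ _ ht]
        exact List.getElem_mem ht
      rw [hw] at hv
      have htokv : P v := hvals _ hmemw v hv
      refine ih (t + 1) (cur.set k₀ v) (by omega) (by rw [List.length_set]; exact hlen)
        (fun q h1 h2 => by rw [getD_set_ne cur k₀ q v (by omega), hsuf q (by omega) h2]) ?_
      intro x hx
      rcases List.mem_or_eq_of_mem_set hx with h | rfl
      · exact hcur x h
      · exact htokv

-- once a non-identity dictionary word's cell is left holding its original word while its own
-- step has passed, some such cell survives to the end of the run (the "debt" moves right)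
lemma debt_run (d : PySem.Dict String String) (orig : List String) :
    ∀ (m t : Nat) (cur : List String) (p : Nat),
      t + m = orig.length → cur.length = orig.length →
      (∀ q, t ≤ q → q < orig.length → cur.getD q "" = orig.getD q "") →
      p < t → p < orig.length →
      d.contains (orig.getD p "") = true →
      (d.get? (orig.getD p "")).getD "" ≠ orig.getD p "" →
      cur.getD p "" = orig.getD p "" →
      ∃ p', p' < orig.length ∧ d.contains (orig.getD p' "") = true ∧
        (d.get? (orig.getD p' "")).getD "" ≠ orig.getD p' "" ∧
        ((List.range' t m).foldl (stepA d) cur).getD p' "" = orig.getD p' "" := by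
  intro m
  induction m with
  | zero =>
    intro t cur p _ _ _ _ hp hc hne hcell
    exact ⟨p, hp, hc, hne, hcell⟩
  | succ m ih =>
    intro t cur p hm hlen hsuf hpt hp hc hne hcell
    have ht : t < orig.length := by omega
    rw [List.range'_succ, List.foldl_cons]
    rcases stepA_cases d cur t (by omega) with ⟨_, heq⟩ | ⟨k₀, v, hcw, hv, hk₀t, hk₀lt, hk₀w, _, heq⟩
    · rw [heq]
      exact ih (t + 1) cur p (by omega) hlen (fun q h1 h2 => hsuf q (by omega) h2)
        (by omega) hp hc hne hcell
    · rw [heq]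
      have hsuf' : ∀ q, t + 1 ≤ q → q < orig.length →
          (cur.set k₀ v).getD q "" = orig.getD q "" := by
        intro q h1 h2
        rw [getD_set_ne cur k₀ q v (by omega), hsuf q (by omega) h2]
      have hlen' : (cur.set k₀ v).length = orig.length := by rw [List.length_set]; exact hlen
      by_cases hkp : k₀ = p
      · subst hkp
        have hwt : cur.getD t "" = orig.getD t "" := hsuf t (le_refl t) ht
        have horig_tp : orig.getD t "" = orig.getD k₀ "" := by
          rw [← hwt, ← hk₀w, hcell]
        refine ih (t + 1) (cur.set k₀ v) t (by omega) hlen' hsuf' (by omega) ht ?_ ?_ ?_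
        · rw [horig_tp]; exact hc
        · rw [horig_tp]; exact hne
        · rw [getD_set_ne cur k₀ t v (by omega), hwt]
      · exact ih (t + 1) (cur.set k₀ v) p (by omega) hlen' hsuf' (by omega) hp hc hne
          (by rw [getD_set_ne cur k₀ p v hkp, hcell])

-- clean phase: while no chain has fired, the state stays (mapped prefix ++ untouched suffix)
lemma loopA_partial (d : PySem.Dict String String) (orig : List String) :
    ∀ (m i : Nat), i + m ≤ orig.length →
      (∀ t k, i ≤ t → t < i + m → k < t → d.contains (orig.getD k "") = true →
        (d.get? (orig.getD k "")).getD "" = orig.getD t "" →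
        d.contains (orig.getD t "") = true →
        (d.get? (orig.getD t "")).getD "" = orig.getD t "" ∨ orig.getD t "" = orig.getD k "") →
      (List.range' i m).foldl (stepA d) ((orig.take i).map (fB d) ++ orig.drop i) =
        (orig.take (i + m)).map (fB d) ++ orig.drop (i + m) := by
  intro m
  induction m with
  | zero => intro i _ _; rfl
  | succ m ih =>
    intro i hi hnd
    rw [List.range'_succ, List.foldl_cons,
      stepA_shape d orig i (by omega) (fun k hk => hnd i k (le_refl i) (by omega) hk)]
    have h := ih (i + 1) (by omega) (fun t k h1 h2 => hnd t k (by omega) (by omega))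
    rw [h, show i + 1 + m = i + (m + 1) by omega]

-- splitting a string on whitespace yields nonempty words containing no whitespace
lemma split₀_go_tok :
    ∀ (s cur : List Char) (acc : List (List Char)),
      (∀ w ∈ acc, w ≠ [] ∧ ∀ c ∈ w, PySem.Chars.isspace c = false) →
      (∀ c ∈ cur, PySem.Chars.isspace c = false) →
      ∀ w ∈ PySem.Chars.split₀.go s cur acc, w ≠ [] ∧ ∀ c ∈ w, PySem.Chars.isspace c = false := by
  intro s
  induction s with
  | nil =>
    intro cur acc hacc hcur w hw
    have hgo : PySem.Chars.split₀.go [] cur acc =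
        if cur.isEmpty = true then acc.reverse else (cur.reverse :: acc).reverse := rfl
    rw [hgo] at hw
    split_ifs at hw with hemp
    · exact hacc w (List.mem_reverse.1 hw)
    · rcases List.mem_cons.1 (List.mem_reverse.1 hw) with rfl | h
      · refine ⟨fun hnil => hemp ?_, fun c hc => hcur c (List.mem_reverse.1 hc)⟩
        have hc0 : cur = [] := by
          have := congrArg List.reverse hnil
          simpa using this
        simp [hc0]
      · exact hacc w h
  | cons c rest ih =>
    intro cur acc hacc hcur w hw
    have hgo : PySem.Chars.split₀.go (c :: rest) cur acc =
        if PySem.Chars.isspace c = true then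
          (if cur.isEmpty = true then PySem.Chars.split₀.go rest [] acc
           else PySem.Chars.split₀.go rest [] (cur.reverse :: acc))
        else PySem.Chars.split₀.go rest (c :: cur) acc := rfl
    rw [hgo] at hw
    split_ifs at hw with hsp hemp
    · exact ih [] acc hacc (by simp) w hw
    · refine ih [] (cur.reverse :: acc) ?_ (by simp) w hw
      intro w' hw'
      rcases List.mem_cons.1 hw' with rfl | h
      · refine ⟨fun hnil => hemp ?_, fun c' hc' => hcur c' (List.mem_reverse.1 hc')⟩
        have hc0 : cur = [] := by
          have := congrArg List.reverse hnil
          simpa using this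
        simp [hc0]
      · exact hacc w' h
    · refine ih (c :: cur) acc hacc ?_ w hw
      intro c' hc'
      rcases List.mem_cons.1 hc' with rfl | h
      · exact Bool.eq_false_iff.2 hsp
      · exact hcur c' h

-- the word/token predicate: nonempty, no space character
def tok (s : String) : Prop := s ≠ "" ∧ ' ' ∉ s.toList

lemma split₀_tok (zin : String) : ∀ w ∈ PySem.Str.split₀ zin, tok w := by
  intro w hw
  have hmem : w.toList ∈ PySem.Chars.split₀ zin.toList := by
    rw [← PySem.Str.split₀_map_toList]
    exact List.mem_map.2 ⟨w, hw, rfl⟩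
  have h := split₀_go_tok zin.toList [] [] (by simp) (by simp) w.toList hmem
  refine ⟨fun hnil => h.1 (by rw [hnil]; rfl), fun hsp => ?_⟩
  have := h.2 ' ' hsp
  simp [PySem.Chars.isspace] at this

-- splitting an equation at a separator character absent from both prefixes
lemma sep_split {a b x y : List Char} (ha : ' ' ∉ a) (hb : ' ' ∉ b)
    (h : a ++ ' ' :: x = b ++ ' ' :: y) : a = b ∧ x = y := by
  induction a generalizing b with
  | nil =>
    cases b with
    | nil => simpa using h
    | cons c t =>
      rw [List.nil_append, List.cons_append] at h
      injection h with h1 _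
      exact absurd (h1 ▸ List.mem_cons_self ..) hb
  | cons c t ih =>
    cases b with
    | nil =>
      rw [List.cons_append, List.nil_append] at h
      injection h with h1 _
      exact absurd (h1 ▸ List.mem_cons_self ..) ha
    | cons c' t' =>
      rw [List.cons_append, List.cons_append] at h
      injection h with h1 h2
      obtain ⟨h3, h4⟩ := ih (fun hm => ha (List.mem_cons_of_mem _ hm))
        (fun hm => hb (List.mem_cons_of_mem _ hm)) h2
      exact ⟨by rw [h1, h3], h4⟩

-- joining nonempty space-free tokens with " " is injective
lemma join_inj : ∀ (l1 l2 : List (List Char)),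
    (∀ w ∈ l1, w ≠ [] ∧ ' ' ∉ w) → (∀ w ∈ l2, w ≠ [] ∧ ' ' ∉ w) →
    PySem.Chars.join [' '] l1 = PySem.Chars.join [' '] l2 → l1 = l2 := by
  intro l1
  induction l1 with
  | nil =>
    intro l2 _ h2 h
    cases l2 with
    | nil => rfl
    | cons q r =>
      exfalso
      cases r with
      | nil =>
        rw [PySem.Chars.join_nil, PySem.Chars.join_singleton] at h
        exact (h2 q (by simp)).1 h.symm
      | cons r0 rs =>
        rw [PySem.Chars.join_nil, PySem.Chars.join_cons_cons] at h
        have := congrArg List.length h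
        simp at this
  | cons p t ih =>
    intro l2 h1 h2 h
    cases t with
    | nil =>
      cases l2 with
      | nil =>
        exfalso
        rw [PySem.Chars.join_singleton, PySem.Chars.join_nil] at h
        exact (h1 p (by simp)).1 h
      | cons q r =>
        cases r with
        | nil =>
          rw [PySem.Chars.join_singleton, PySem.Chars.join_singleton] at h
          rw [h]
        | cons r0 rs =>
          exfalso
          rw [PySem.Chars.join_singleton, PySem.Chars.join_cons_cons] at h
          exact (h1 p (by simp)).2 (by rw [h]; simp)
    | cons t0 ts =>
      cases l2 with
      | nil =>
        exfalso
        rw [PySem.Chars.join_cons_cons, PySem.Chars.join_nil] at h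
        have := congrArg List.length h
        simp at this
      | cons q r =>
        cases r with
        | nil =>
          exfalso
          rw [PySem.Chars.join_cons_cons, PySem.Chars.join_singleton] at h
          exact (h2 q (by simp)).2 (by rw [← h]; simp)
        | cons r0 rs =>
          rw [PySem.Chars.join_cons_cons, PySem.Chars.join_cons_cons] at h
          have h' : p ++ ' ' :: PySem.Chars.join [' '] (t0 :: ts) =
              q ++ ' ' :: PySem.Chars.join [' '] (r0 :: rs) := by
            simpa using h
          obtain ⟨hpq, hXY⟩ := sep_split (h1 p (by simp)).2 (h2 q (by simp)).2 h'
          have htail := ih (r0 :: rs) (fun w hw => h1 w (List.mem_cons_of_mem _ hw))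
            (fun w hw => h2 w (List.mem_cons_of_mem _ hw)) hXY
          rw [hpq, htail]

lemma str_join_inj (l1 l2 : List String) (h1 : ∀ w ∈ l1, tok w) (h2 : ∀ w ∈ l2, tok w)
    (h : PySem.Str.join " " l1 = PySem.Str.join " " l2) : l1 = l2 := by
  have hL := congrArg String.toList h
  rw [PySem.Str.toList_join, PySem.Str.toList_join] at hL
  have hsep : (" " : String).toList = [' '] := rfl
  rw [hsep] at hL
  have htok : ∀ (l : List String), (∀ w ∈ l, tok w) →
      ∀ w ∈ l.map String.toList, w ≠ [] ∧ ' ' ∉ w := by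
    intro l hl w hw
    obtain ⟨x, hx, rfl⟩ := List.mem_map.1 hw
    obtain ⟨hne, hsp⟩ := hl x hx
    exact ⟨fun hnil => hne (String.toList_inj.1 (by rw [hnil]; rfl)), hsp⟩
  have hmaps := join_inj _ _ (htok l1 h1) (htok l2 h2) hL
  exact List.map_injective_iff.2 (fun a b hab => String.toList_inj.1 hab) hmaps

-- ===== VERDICT (by name: the statement is the Claim_ definition above) =====
theorem synoniemen_spec : Claim_unchanged_synoniemen := by
  intro zin book _ hpre hD
  by_cases hcf : chainFires zin book = true
  · exact absurd (show D_synoniemen zin book by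
      unfold D_synoniemen
      rw [hcf, hpre hcf]
      rfl) hD
  show synoniemen zin book = synoniemen_alt zin book
  unfold synoniemen synoniemen_alt
  set d := PySem.Dict.ofList book with hd
  set orig := PySem.Str.split₀ zin with horig
  have hnd : ∀ t k, (0:Nat) ≤ t → t < 0 + orig.length → k < t →
      d.contains (orig.getD k "") = true →
      (d.get? (orig.getD k "")).getD "" = orig.getD t "" →
      d.contains (orig.getD t "") = true →
      (d.get? (orig.getD t "")).getD "" = orig.getD t "" ∨ orig.getD t "" = orig.getD k "" := by
    intro t k _ htlen hkt hck hgk hct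
    by_contra hcon
    push_neg at hcon
    refine hcf ?_
    unfold chainFires
    rw [List.any_eq_true]
    refine ⟨k, List.mem_range.2 (by rw [← horig]; omega), ?_⟩
    rw [List.any_eq_true]
    refine ⟨t, List.mem_range.2 (by rw [← horig]; omega), ?_⟩
    rw [← horig, ← hd]
    simp only [Bool.and_eq_true, decide_eq_true_eq, beq_iff_eq, Bool.not_eq_true',
      beq_eq_false_iff_ne]
    exact ⟨⟨⟨⟨⟨hkt, hck⟩, hgk⟩, hct⟩, hcon.1⟩, hcon.2⟩
  have h := loopA_partial d orig orig.length 0 (by omega) hnd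
  simp only [List.take_zero, List.map_nil, List.nil_append, List.drop_zero, Nat.zero_add,
    List.take_length, List.drop_length, List.append_nil] at h
  simp only [List.range_eq_range']
  exact congrArg (PySem.Str.join " ") h

theorem synoniemen_changed : Claim_changed_synoniemen := by
  unfold Claim_changed_synoniemen; decide

theorem synoniemen_tight : Claim_exact_synoniemen := by
  intro zin book hdom hpre hD hEq
  set d := PySem.Dict.ofList book with hd
  set orig := PySem.Str.split₀ zin with horig
  set n := orig.length with hn
  have hA : synoniemen zin book = PySem.Str.join " " ((List.range' 0 n).foldl (stepA d) orig) := by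
    unfold synoniemen
    simp only [List.range_eq_range']
    rfl
  have hB : synoniemen_alt zin book = PySem.Str.join " " (orig.map (fB d)) := rfl
  -- unpack the chain pair and the cleanliness from D_
  unfold D_synoniemen at hD
  rw [Bool.and_eq_true] at hD
  obtain ⟨hch, hcl⟩ := hD
  unfold chainFires at hch
  rw [List.any_eq_true] at hch
  obtain ⟨i, hi, hD2⟩ := hch
  rw [List.any_eq_true] at hD2
  obtain ⟨j, hj, hbody⟩ := hD2
  rw [List.mem_range] at hi hj
  rw [← horig] at hi hj
  rw [← horig, ← hd] at hbody
  simp only [Bool.and_eq_true, decide_eq_true_eq, beq_iff_eq, Bool.not_eq_true',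
    beq_eq_false_iff_ne] at hbody
  obtain ⟨⟨⟨⟨⟨hij, hc1⟩, hc2⟩, hc3⟩, hc4⟩, hc5⟩ := hbody
  -- the first step at which a chain fires
  have hex : ∃ t, (decide (t < n) && ((List.range t).any (fun k =>
      d.contains (orig.getD k "") && ((d.get? (orig.getD k "")).getD "" == orig.getD t "") &&
      d.contains (orig.getD t "") && !((d.get? (orig.getD t "")).getD "" == orig.getD t "") &&
      !(orig.getD t "" == orig.getD k "")))) = true := by
    refine ⟨j, ?_⟩
    simp only [Bool.and_eq_true, decide_eq_true_eq, List.any_eq_true, List.mem_range,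
      beq_iff_eq, Bool.not_eq_true', beq_eq_false_iff_ne]
    exact ⟨hj, i, hij, ⟨⟨⟨hc1, hc2⟩, hc3⟩, hc4⟩, hc5⟩
  obtain ⟨js, hPj, hminPb⟩ : ∃ js, (decide (js < n) && ((List.range js).any (fun k =>
      d.contains (orig.getD k "") && ((d.get? (orig.getD k "")).getD "" == orig.getD js "") &&
      d.contains (orig.getD js "") && !((d.get? (orig.getD js "")).getD "" == orig.getD js "") &&
      !(orig.getD js "" == orig.getD k "")))) = true ∧
      ∀ t, t < js → ¬ ((decide (t < n) && ((List.range t).any (fun k =>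
      d.contains (orig.getD k "") && ((d.get? (orig.getD k "")).getD "" == orig.getD t "") &&
      d.contains (orig.getD t "") && !((d.get? (orig.getD t "")).getD "" == orig.getD t "") &&
      !(orig.getD t "" == orig.getD k "")))) = true) :=
    ⟨Nat.find hex, Nat.find_spec hex, fun t ht => Nat.find_min hex ht⟩
  simp only [Bool.and_eq_true, decide_eq_true_eq, List.any_eq_true, List.mem_range,
    beq_iff_eq, Bool.not_eq_true', beq_eq_false_iff_ne] at hPj
  obtain ⟨hjsn, k, hkjs, ⟨⟨⟨hk1, hk2⟩, hk3⟩, hk4⟩, hk5⟩ := hPj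
  -- clean run up to js
  have hnd : ∀ t k', (0:Nat) ≤ t → t < 0 + js → k' < t →
      d.contains (orig.getD k' "") = true →
      (d.get? (orig.getD k' "")).getD "" = orig.getD t "" →
      d.contains (orig.getD t "") = true →
      (d.get? (orig.getD t "")).getD "" = orig.getD t "" ∨ orig.getD t "" = orig.getD k' "" := by
    intro t k' _ htjs hkt hck hgk hct
    have hmint := hminPb t (by omega)
    simp only [Bool.and_eq_true, decide_eq_true_eq, List.any_eq_true, List.mem_range,
      beq_iff_eq, Bool.not_eq_true', beq_eq_false_iff_ne, not_and, not_exists] at hmint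
    by_contra hcon
    push_neg at hcon
    exact hmint (by omega) k' hkt ⟨⟨⟨hck, hgk⟩, hct⟩, hcon.1⟩ hcon.2
  have hclean := loopA_partial d orig js 0 (by omega) hnd
  simp only [List.take_zero, List.map_nil, List.nil_append, List.drop_zero, Nat.zero_add] at hclean
  set S := (orig.take js).map (fB d) ++ orig.drop js with hS
  have hSlen : S.length = n := by rw [hS]; simp; omega
  have hwjs : S.getD js "" = orig.getD js "" := clean_suffix d orig js js (le_refl _) hjsn
  rcases stepA_cases d S js (by omega) with ⟨hnc, _⟩ | ⟨k₀, v, hcS, hvS, hk₀le, hk₀lt, hk₀w, hminS, heqS⟩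
  · rw [hwjs, hk3] at hnc
    exact Bool.noConfusion hnc
  · -- the leftmost occurrence is the mapped cell k (or left of it), not cell js
    have hcellk : S.getD k "" = orig.getD js "" := by
      rw [hS, clean_prefix d orig js k hkjs (by omega)]
      obtain ⟨vk, hvk⟩ : ∃ vk, d.get? (orig.getD k "") = some vk := by
        apply Option.isSome_iff_exists.1
        rw [← PySem.Dict.contains_eq_isSome_get?]
        exact hk1
      rw [fB, hvk]
      rw [hvk] at hk2
      simpa using hk2
    have hk₀k : k₀ ≤ k := by
      by_contra hcon
      exact hminS k (by omega) (by rw [hcellk, hwjs])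
    have hk₀js : k₀ ≠ js := by omega
    -- after step js the debt sits at cell js; run it to the end
    obtain ⟨p', hp'n, hp'c, hp'ne, hp'cell⟩ := debt_run d orig (n - (js+1)) (js+1) (S.set k₀ v) js
      (by omega) (by rw [List.length_set]; exact hSlen)
      (fun q h1 h2 => by
        rw [getD_set_ne S k₀ q v (by omega), hS, clean_suffix d orig js q (by omega) h2])
      (by omega) hjsn hk3 hk4
      (by rw [getD_set_ne S k₀ js v hk₀js, hwjs])
    have hsplit : List.range' 0 n = List.range' 0 js ++ js :: List.range' (js+1) (n - (js+1)) := by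
      have h1 := List.range'_append (s := 0) (m := js) (n := n - js) (step := 1)
      rw [show 0 + 1 * js = js by omega, show js + (n - js) = n by omega] at h1
      rw [← h1]
      congr 1
      rw [show n - js = (n - (js+1)) + 1 by omega, List.range'_succ]
    have hLAval : (List.range' 0 n).foldl (stepA d) orig =
        (List.range' (js+1) (n - (js+1))).foldl (stepA d) (S.set k₀ v) := by
      rw [hsplit, List.foldl_append, List.foldl_cons, hclean, heqS]
    -- the two final lists differ at cell p'
    have hLBcell : (orig.map (fB d)).getD p' "" = fB d (orig.getD p' "") := by
      have h := getD_map_append orig [] (fB d) p' hp'n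
      simpa using h
    have hfBne : fB d (orig.getD p' "") ≠ orig.getD p' "" := by
      obtain ⟨vp, hvp⟩ : ∃ vp, d.get? (orig.getD p' "") = some vp := by
        apply Option.isSome_iff_exists.1
        rw [← PySem.Dict.contains_eq_isSome_get?]
        exact hp'c
      rw [fB, hvp]
      rw [hvp] at hp'ne
      simpa using hp'ne
    have hneq : (List.range' 0 n).foldl (stepA d) orig ≠ orig.map (fB d) := by
      intro hcon
      apply hfBne
      have hcell : ((List.range' 0 n).foldl (stepA d) orig).getD p' "" = orig.getD p' "" := by
        rw [hLAval]
        exact hp'cell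
      rw [hcon, hLBcell] at hcell
      exact hcell
    -- but equal join of token lists forces the lists equal
    have hvalsP : ∀ w, w ∈ orig → ∀ v', d.get? w = some v' → tok v' := by
      intro w hw v' hv'
      unfold cleanSyns at hcl
      rw [List.all_eq_true] at hcl
      have h := hcl w (horig ▸ hw)
      rw [← hd, hv'] at h
      simp only [Option.elim_some, Bool.and_eq_true, Bool.not_eq_true', beq_eq_false_iff_ne,
        List.contains_eq_mem, decide_eq_false_iff_not] at h
      exact ⟨h.1, h.2⟩
    have htokLA : ∀ x ∈ (List.range' 0 n).foldl (stepA d) orig, tok x := by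
      refine tokens_run d orig tok hvalsP n 0 orig (by omega) rfl (fun q _ _ => rfl) ?_
      intro x hx
      exact split₀_tok zin x (horig ▸ hx)
    have htokLB : ∀ x ∈ orig.map (fB d), tok x := by
      intro x hx
      obtain ⟨y, hy, rfl⟩ := List.mem_map.1 hx
      unfold fB
      cases hgy : d.get? y with
      | none => simpa using split₀_tok zin y (horig ▸ hy)
      | some v' => simpa using hvalsP y hy v' hgy
    have heqL : (List.range' 0 n).foldl (stepA d) orig = orig.map (fB d) :=
      str_join_inj _ _ htokLA htokLB (by rw [← hA, ← hB]; exact hEq)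
    exact hneq heqL
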